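-- pv_equiv track=rewrite | github.com/felipery03/music_nlp_analysis | extract_musics.py | calculo_neighborhood
-- ===== SOURCE A (Python) =====
-- def calculo_neighborhood(vetor_frase, palavra_position,neighborhood_size):
--     menor = 0
--     for i in range (neighborhood_size,0,-1):
--         if palavra_position-i >= 0:
--             menor = -i
--             break
--     maior = 0
--     for i in range (neighborhood_size,0,-1):
--         if palavra_position+i < len(vetor_frase):
--             maior = i
--             break
--     return menor, maior
-- ===== SOURCE B (Python) =====
-- def calculo_neighborhood(vetor_frase, palavra_position, neighborhood_size):
--     menor = -max(0, min(neighborhood_size, palavra_position))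
--     maior = max(0, min(neighborhood_size, len(vetor_frase) - 1 - palavra_position))
--     return menor, maior
-- ===== Notes on version B (the rewrite author's own statement) =====
-- stated objective: simpler
-- what changed: Replaced both downward-breaking search loops with two direct clamped min/max arithmetic expressions, so B has no loops at all.
import Mathlib
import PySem

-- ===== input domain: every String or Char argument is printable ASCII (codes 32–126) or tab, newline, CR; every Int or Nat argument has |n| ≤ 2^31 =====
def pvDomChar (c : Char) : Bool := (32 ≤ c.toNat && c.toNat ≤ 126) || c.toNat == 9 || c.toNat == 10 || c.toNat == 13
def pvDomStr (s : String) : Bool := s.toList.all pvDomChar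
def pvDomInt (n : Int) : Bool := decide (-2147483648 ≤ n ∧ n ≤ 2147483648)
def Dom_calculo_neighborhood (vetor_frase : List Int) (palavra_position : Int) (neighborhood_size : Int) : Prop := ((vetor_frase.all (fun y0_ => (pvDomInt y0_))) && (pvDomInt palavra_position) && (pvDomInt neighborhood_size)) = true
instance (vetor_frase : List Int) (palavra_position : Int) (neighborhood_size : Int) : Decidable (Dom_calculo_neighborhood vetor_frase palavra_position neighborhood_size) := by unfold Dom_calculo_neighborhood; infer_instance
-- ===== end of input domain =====

-- B replaces A's two downward-breaking loops with loop-free clamped min/max arithmetic (simpler, same values everywhere).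

-- ===== PORT A =====
-- first loop of A: scan i over the given countdown list, break with menor = -i on the first i with pos - i >= 0
def pvMenorLoop (pos : Int) : List Int → Int
  | [] => 0
  | i :: rest => if pos - i ≥ 0 then -i else pvMenorLoop pos rest

-- second loop of A: break with maior = i on the first i with pos + i < len
def pvMaiorLoop (pos len : Int) : List Int → Int
  | [] => 0
  | i :: rest => if pos + i < len then i else pvMaiorLoop pos len rest

def calculo_neighborhood (vetor_frase : List Int) (palavra_position : Int) (neighborhood_size : Int) : Int × Int :=
  let menor := pvMenorLoop palavra_position (PySem.List.pyRange neighborhood_size 0 (-1))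
  let maior := pvMaiorLoop palavra_position (vetor_frase.length : Int) (PySem.List.pyRange neighborhood_size 0 (-1))
  (menor, maior)

-- ===== PORT B =====
def calculo_neighborhood_alt (vetor_frase : List Int) (palavra_position : Int) (neighborhood_size : Int) : Int × Int :=
  (-(max 0 (min neighborhood_size palavra_position)),
    max 0 (min neighborhood_size ((vetor_frase.length : Int) - 1 - palavra_position)))

-- ===== PRECONDITION & SPEC =====
def Spec_calculo_neighborhood (vetor_frase : List Int) (palavra_position : Int) (neighborhood_size : Int) (out : Int × Int) : Prop := out = calculo_neighborhood_alt vetor_frase palavra_position neighborhood_size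
instance (vetor_frase : List Int) (palavra_position : Int) (neighborhood_size : Int) (out : Int × Int) : Decidable (Spec_calculo_neighborhood vetor_frase palavra_position neighborhood_size out) := by unfold Spec_calculo_neighborhood; infer_instance

-- ===== CLAIM (what is proved, stated in full; the proofs are below) =====
def Claim_equal_calculo_neighborhood : Prop := ∀ (vetor_frase : List Int) (palavra_position : Int) (neighborhood_size : Int), Dom_calculo_neighborhood vetor_frase palavra_position neighborhood_size → Spec_calculo_neighborhood vetor_frase palavra_position neighborhood_size (calculo_neighborhood vetor_frase palavra_position neighborhood_size)

-- ===== LEMMAS AND PROOFS =====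
theorem pvMenorLoop_range (k : Nat) (pos : Int) :
    pvMenorLoop pos (PySem.List.pyRange (k : Int) 0 (-1)) = -(max 0 (min (k : Int) pos)) := by
  induction k with
  | zero => simp [PySem.List.pyRange_neg_one_eq_nil (by norm_num : (0:Int) ≤ 0), pvMenorLoop]
  | succ k ih =>
    rw [PySem.List.pyRange_neg_one_cons (by positivity : (0:Int) < ((k+1 : Nat) : Int))]
    simp only [pvMenorLoop]
    split
    · push_cast; omega
    · rw [show ((k+1 : Nat) : Int) - 1 = (k : Int) by push_cast; ring, ih]; push_cast at *; omega

theorem pvMaiorLoop_range (k : Nat) (pos len : Int) :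
    pvMaiorLoop pos len (PySem.List.pyRange (k : Int) 0 (-1)) = max 0 (min (k : Int) (len - 1 - pos)) := by
  induction k with
  | zero => simp [PySem.List.pyRange_neg_one_eq_nil (by norm_num : (0:Int) ≤ 0), pvMaiorLoop]
  | succ k ih =>
    rw [PySem.List.pyRange_neg_one_cons (by positivity : (0:Int) < ((k+1 : Nat) : Int))]
    simp only [pvMaiorLoop]
    split
    · push_cast; omega
    · rw [show ((k+1 : Nat) : Int) - 1 = (k : Int) by push_cast; ring, ih]; push_cast at *; omega

-- ===== VERDICT (by name: the statement is the Claim_ definition above) =====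
theorem calculo_neighborhood_spec : Claim_equal_calculo_neighborhood := by
  intro vf pos n _
  unfold Spec_calculo_neighborhood calculo_neighborhood calculo_neighborhood_alt
  rcases le_or_gt n 0 with hn | (hn : 0 < n)
  · have hnil : PySem.List.pyRange n 0 (-1) = [] := PySem.List.pyRange_neg_one_eq_nil hn
    simp only [hnil, pvMenorLoop, pvMaiorLoop]
    have h1 : max 0 (min n pos) = 0 := by omega
    have h2 : max 0 (min n ((vf.length : Int) - 1 - pos)) = 0 := by omega
    rw [h1, h2]; norm_num
  · obtain ⟨k, rfl⟩ : ∃ k : Nat, n = (k : Int) := ⟨n.toNat, (Int.toNat_of_nonneg hn.le).symm⟩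
    simp only [pvMenorLoop_range, pvMaiorLoop_range]
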